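-- pv_equiv track=rewrite | github.com/snoopy16/Python-Projects | StringManupulation/allwrong.py | getStringRepresentation
-- ===== SOURCE A (Python) =====
-- def getStringRepresentation(C: str) -> str:
--     string = ""
--     for i in C:
--         if i == "1":
--             string+="B"
--         elif i == "0":
--             string+="A"
--         else:
--             return ""
--
--     return string
-- ===== SOURCE B (Python) =====
-- def getStringRepresentation(C: str) -> str:
--     if all(ch in "01" for ch in C):
--         return C.translate(str.maketrans("01", "AB"))
--     return ""
-- ===== Notes on version B (the rewrite author's own statement) =====
-- stated objective: simpler
-- what changed: Replaces the interleaved loop-with-early-return by whole-string validation up front followed by a separate table-driven translate pass.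
import Mathlib
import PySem

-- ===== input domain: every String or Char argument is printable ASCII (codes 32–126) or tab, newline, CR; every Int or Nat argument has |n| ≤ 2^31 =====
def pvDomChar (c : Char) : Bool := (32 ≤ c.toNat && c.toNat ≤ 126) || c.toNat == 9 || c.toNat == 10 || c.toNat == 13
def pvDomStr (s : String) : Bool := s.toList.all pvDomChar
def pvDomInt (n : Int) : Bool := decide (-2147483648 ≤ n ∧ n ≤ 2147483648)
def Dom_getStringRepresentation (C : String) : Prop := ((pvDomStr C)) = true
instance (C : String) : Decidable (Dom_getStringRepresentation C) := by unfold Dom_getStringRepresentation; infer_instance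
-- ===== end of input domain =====

-- B validates the whole string first and then maps in a separate translate pass — simpler decomposition, same values.

-- ===== PORT A =====
-- the accumulating loop: string = ""; for i in C: append "B"/"A" or return "" immediately
def getStringRepresentationGo : List Char → List Char → List Char
  | [], acc => acc
  | i :: rest, acc =>
      if i = '1' then getStringRepresentationGo rest (acc ++ ['B'])
      else if i = '0' then getStringRepresentationGo rest (acc ++ ['A'])
      else []

def getStringRepresentation (C : String) : String :=
  String.mk (getStringRepresentationGo C.toList [])

-- ===== PORT B =====
-- all(ch in "01" for ch in C)
def getStringRepresentationValid (C : String) : Bool :=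
  C.toList.all (fun ch => ch = '0' || ch = '1')

-- the translate table "01" -> "AB"
def getStringRepresentationTr (c : Char) : Char :=
  if c = '0' then 'A' else if c = '1' then 'B' else c

def getStringRepresentation_alt (C : String) : String :=
  if getStringRepresentationValid C then String.mk (C.toList.map getStringRepresentationTr)
  else ""

-- ===== PRECONDITION & SPEC =====
def Spec_getStringRepresentation (C : String) (out : String) : Prop := out = getStringRepresentation_alt C
instance (C : String) (out : String) : Decidable (Spec_getStringRepresentation C out) := by unfold Spec_getStringRepresentation; infer_instance

-- ===== CLAIM (what is proved, stated in full; the proofs are below) =====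
def Claim_equal_getStringRepresentation : Prop := ∀ (C : String), Dom_getStringRepresentation C → Spec_getStringRepresentation C (getStringRepresentation C)

-- ===== LEMMAS AND PROOFS =====
theorem getStringRepresentationGo_eq (l acc : List Char) :
    getStringRepresentationGo l acc =
      if l.all (fun ch => ch = '0' || ch = '1') then acc ++ l.map getStringRepresentationTr else [] := by
  induction l generalizing acc with
  | nil => simp [getStringRepresentationGo]
  | cons c rest ih =>
      by_cases h1 : c = '1'
      · subst h1
        by_cases hr : rest.all (fun ch => ch = '0' || ch = '1') <;>
          simp [getStringRepresentationGo, ih, hr, getStringRepresentationTr]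
      · by_cases h0 : c = '0'
        · subst h0
          by_cases hr : rest.all (fun ch => ch = '0' || ch = '1') <;>
            simp [getStringRepresentationGo, ih, hr, getStringRepresentationTr]
        · simp [getStringRepresentationGo, h1, h0]

-- ===== VERDICT (by name: the statement is the Claim_ definition above) =====
theorem getStringRepresentation_spec : Claim_equal_getStringRepresentation := by
  intro C _
  unfold Spec_getStringRepresentation getStringRepresentation getStringRepresentation_alt getStringRepresentationValid
  rw [getStringRepresentationGo_eq]
  split_ifs with h
  · simp
  · rfl
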